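-- pv_equiv track=rewrite | github.com/krushavirapara/DSA2 | string/count_unique_substring.py | count_unique_substring
-- ===== SOURCE A (Python) =====
-- from collections import Counter
--
-- def count_unique_substring(s,k):
-- 	i=0
-- 	j=0
-- 	count=0
-- 	while j<len(s):
-- 		if (j-i+1)<k:
-- 			j+=1
-- 		elif(j-i+1==k):
-- 			sub = s[i:j+1]
-- 			if len(Counter(sub))==k:
-- 				count+=1
-- 			j+=1
-- 			i+=1
-- 	return count
-- ===== SOURCE B (Python) =====
-- def count_unique_substring(s, k):
--     freq = {}
--     distinct = 0
--     count = 0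
--     for j, c in enumerate(s):
--         freq[c] = freq.get(c, 0) + 1
--         if freq[c] == 1:
--             distinct += 1
--         if j >= k:
--             d = s[j - k]
--             freq[d] = freq[d] - 1
--             if freq[d] == 0:
--                 distinct -= 1
--         if j >= k - 1 and distinct == k:
--             count += 1
--     return count
-- ===== Notes on version B (the rewrite author's own statement) =====
-- stated objective: faster
-- what changed: Replaced the rebuild-a-Counter-per-window scan with a single-pass sliding window that maintains an incremental character frequency map and a running distinct-count, so each window is checked in O(1) instead of O(k).
import Mathlib
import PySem

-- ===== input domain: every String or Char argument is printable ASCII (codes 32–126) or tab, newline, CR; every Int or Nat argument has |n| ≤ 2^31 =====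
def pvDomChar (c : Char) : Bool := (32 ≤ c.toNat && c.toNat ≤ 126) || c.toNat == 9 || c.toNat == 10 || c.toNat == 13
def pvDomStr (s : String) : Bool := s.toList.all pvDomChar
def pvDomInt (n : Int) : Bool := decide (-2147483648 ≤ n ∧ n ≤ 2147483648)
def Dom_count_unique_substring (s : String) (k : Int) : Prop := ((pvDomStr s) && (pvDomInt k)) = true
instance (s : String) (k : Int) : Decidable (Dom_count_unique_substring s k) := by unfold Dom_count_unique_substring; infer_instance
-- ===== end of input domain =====

-- B replaces A's rebuild-a-Counter-per-window scan by a one-pass sliding window with an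
-- incremental frequency dict and a running distinct count; return values proved equal on Pre_.

-- ===== PORT A =====
-- A's while loop; both branches advance j, so fuel = len(s)+1 suffices whenever k ≥ 1.
-- For k ≤ 0 on a nonempty string NEITHER branch fires and the Python loop spins forever
-- (excluded by Pre_); there the port burns its fuel and returns the current count.
def pvALoop (l : List Char) (k : Int) : Nat → Int → Int → Int → Int
  | 0, _, _, count => count
  | fuel+1, i, j, count =>
    if j < (l.length : Int) then
      if j - i + 1 < k then
        pvALoop l k fuel i (j+1) count
      else if j - i + 1 = k then
        let sub := PySem.List.slice l (some i) (some (j+1))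
        let count' := if ((PySem.Dict.counter sub).size : Int) = k then count + 1 else count
        pvALoop l k fuel (i+1) (j+1) count'
      else
        pvALoop l k fuel i j count
    else count

def count_unique_substring (s : String) (k : Int) : Int :=
  pvALoop s.toList k (s.toList.length + 1) 0 0 0

-- ===== PORT B =====
-- one iteration of B's for-loop; state = (freq, distinct, count)
def pvBStep (l : List Char) (k : Int) (st : PySem.Dict Char Int × Int × Int) (jc : Int × Char) :
    PySem.Dict Char Int × Int × Int :=
  let freq := st.1
  let distinct := st.2.1
  let count := st.2.2
  let j := jc.1
  let c := jc.2
  let freq := freq.insert c (freq.getD c 0 + 1)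
  let distinct := if freq.getD c 0 = 1 then distinct + 1 else distinct
  let fd :=
    if k ≤ j then
      -- s[j-k]: always in range when 1 ≤ k (inside Pre_); none = Python's IndexError
      match PySem.List.pyGet? l (j - k) with
      | some d =>
        let freq := freq.insert d (freq.getD d 0 - 1)
        let distinct := if freq.getD d 0 = 0 then distinct - 1 else distinct
        (freq, distinct)
      | none => (freq, distinct)
    else (freq, distinct)
  let count := if k - 1 ≤ j ∧ fd.2 = k then count + 1 else count
  (fd.1, fd.2, count)

def count_unique_substring_alt (s : String) (k : Int) : Int :=
  ((PySem.List.enumerate s.toList).foldl (pvBStep s.toList k) (PySem.Dict.empty, 0, 0)).2.2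

-- ===== PRECONDITION & SPEC =====
-- Pre_ excludes exactly k ≤ 0 with a nonempty string: there A's while loop never advances
-- (the Python call diverges, returning nothing), so nothing is claimed about those inputs.
def Pre_count_unique_substring (s : String) (k : Int) : Prop := s.toList = [] ∨ 1 ≤ k
instance (s : String) (k : Int) : Decidable (Pre_count_unique_substring s k) := by
  unfold Pre_count_unique_substring; infer_instance

def pvWitness_count_unique_substring : String × Int := ("abcab", 3)

def Spec_count_unique_substring (s : String) (k : Int) (out : Int) : Prop :=
  out = count_unique_substring_alt s k
instance (s : String) (k : Int) (out : Int) : Decidable (Spec_count_unique_substring s k out) := by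
  unfold Spec_count_unique_substring; infer_instance

-- ===== CLAIM (what is proved, stated in full; the proofs are below) =====
def Claim_equal_count_unique_substring : Prop :=
  ∀ (s : String) (k : Int), Dom_count_unique_substring s k →
    Pre_count_unique_substring s k →
    Spec_count_unique_substring s k (count_unique_substring s k)

-- ===== LEMMAS AND PROOFS =====

-- the window of the last (at most) kn characters of the first m characters of l
def pvWin (l : List Char) (kn m : Nat) : List Char := (l.drop (m - kn)).take (min kn m)

-- the common specification both loops are reduced to:
-- index j is counted iff k ≤ j+1 and the k-window ending at j has exactly k distinct characters
def pvCond (l : List Char) (k : Int) (j : Nat) : Bool :=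
  decide (k ≤ (j : Int) + 1 ∧ ((pvWin l k.toNat (j + 1)).toFinset.card : Int) = k)

theorem pvSetLen (w : List Char) : (PySem.Set.ofList w).length = w.toFinset.card := by
  have hnd := PySem.Set.nodup_ofList w
  have hts : (PySem.Set.ofList w).toFinset = w.toFinset := by
    ext x; simp [PySem.Set.mem_ofList]
  rw [← List.toFinset_card_of_nodup hnd, hts]

theorem pvCounterSize (w : List Char) : (PySem.Dict.counter w).size = w.toFinset.card := by
  have h : (PySem.Dict.counter w).size = (PySem.Dict.counter w).keys.length := by
    simp [PySem.Dict.size, PySem.Dict.keys]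
  rw [h, PySem.Dict.keys_counter, pvSetLen]

theorem pvCardAppend (w : List Char) (c : Char) :
    (w ++ [c]).toFinset.card = w.toFinset.card + (if c ∈ w then 0 else 1) := by
  rw [List.toFinset_append]
  by_cases h : c ∈ w
  · simp [h, Finset.union_eq_left.2, Finset.singleton_subset_iff.2, List.mem_toFinset]
  · simp only [List.toFinset_cons, List.toFinset_nil, insert_empty_eq]
    rw [Finset.union_comm, ← Finset.insert_eq, Finset.card_insert_of_notMem (by simp [h])]
    simp [h]

theorem pvCardCons (d : Char) (t : List Char) :
    (d :: t).toFinset.card = t.toFinset.card + (if d ∈ t then 0 else 1) := by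
  rw [List.toFinset_cons]
  by_cases h : d ∈ t
  · simp [Finset.insert_eq_self.2, List.mem_toFinset, h]
  · rw [Finset.card_insert_of_notMem (by simp [h])]; simp [h]

theorem pvWinGrow (l : List Char) (kn m : Nat) (c : Char) (hm : m < l.length) (hc : l[m]! = c)
    (h : m < kn) : pvWin l kn (m + 1) = pvWin l kn m ++ [c] := by
  unfold pvWin
  have h1 : m - kn = 0 := by omega
  have h2 : m + 1 - kn = 0 := by omega
  have h3 : min kn m = m := by omega
  have h4 : min kn (m + 1) = m + 1 := by omega
  rw [h1, h2, h3, h4]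
  simp only [List.drop_zero]
  rw [List.take_add_one]
  have : l[m]? = some c := by rw [List.getElem?_eq_getElem hm, ← hc, getElem!_pos l m hm]
  simp [this]

theorem pvWinSlide (l : List Char) (kn m : Nat) (c : Char) (hm : m < l.length) (hc : l[m]! = c)
    (h : kn ≤ m) (hk : 1 ≤ kn) :
    pvWin l kn m = l[m - kn]! :: ((l.drop (m + 1 - kn)).take (kn - 1)) ∧
      pvWin l kn (m + 1) = ((l.drop (m + 1 - kn)).take (kn - 1)) ++ [c] := by
  obtain ⟨p, rfl⟩ : ∃ p, kn = p + 1 := ⟨kn - 1, by omega⟩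
  unfold pvWin
  have h3 : min (p + 1) m = p + 1 := by omega
  have h4 : min (p + 1) (m + 1) = p + 1 := by omega
  have hlt : m - (p + 1) < l.length := by omega
  have hsimp : p + 1 - 1 = p := by omega
  rw [h3, h4, hsimp]
  constructor
  · rw [List.drop_eq_getElem_cons hlt, List.take_succ_cons, getElem!_pos l (m - (p + 1)) hlt,
      show m - (p + 1) + 1 = m + 1 - (p + 1) by omega]
  · have hlen : p < (l.drop (m + 1 - (p + 1))).length := by
      rw [List.length_drop]; omega
    rw [List.take_add_one, List.getElem?_eq_getElem hlen]
    simp only [Option.toList_some, List.getElem_drop,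
      show m + 1 - (p + 1) + p = m by omega]
    rw [← hc, getElem!_pos l m hm]

theorem pvALoopSpec (l : List Char) (k : Int) (hk : 1 ≤ k) :
    ∀ (f : Nat) (j : Nat) (count : Int), j ≤ l.length → f = l.length - j + 1 →
      pvALoop l k f (max 0 ((j : Int) + 1 - k)) (j : Int) count
        = count + ((List.range' j (l.length - j)).countP (pvCond l k) : Int) := by
  intro f
  induction f with
  | zero => intro j count hj hf; omega
  | succ f ih =>
    intro j count hj hf
    by_cases hjn : j < l.length
    · have hrange : l.length - j = (l.length - (j + 1)) + 1 := by omega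
      rw [hrange, List.range'_succ, List.countP_cons]
      by_cases hsmall : (j : Int) + 1 < k
      · -- growing phase: i = 0, window smaller than k
        have hmax : max 0 ((j : Int) + 1 - k) = 0 := by omega
        have hcond : pvCond l k j = false := by
          simp only [pvCond, decide_eq_false_iff_not, not_and]
          intro h; omega
        rw [hmax]
        show pvALoop l k (f + 1) 0 (j : Int) count = _
        rw [show pvALoop l k (f + 1) 0 (j : Int) count
            = pvALoop l k f 0 ((j : Int) + 1) count by
          simp only [pvALoop]
          rw [if_pos (by exact_mod_cast hjn), if_pos (by omega)]]
        have h0 : (0 : Int) = max 0 (((j + 1 : Nat) : Int) + 1 - k) := by push_cast; omega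
        have hj1 : (j : Int) + 1 = ((j + 1 : Nat) : Int) := by push_cast; ring
        rw [h0, hj1, ih (j + 1) count (by omega) (by omega)]
        simp [hcond]
      · -- sliding phase: i = j+1-k, window size exactly k
        have hkj : k ≤ (j : Int) + 1 := by omega
        have hmax : max 0 ((j : Int) + 1 - k) = (j : Int) + 1 - k := by omega
        rw [hmax]
        show pvALoop l k (f + 1) ((j : Int) + 1 - k) (j : Int) count = _
        have hsub : PySem.List.slice l (some ((j : Int) + 1 - k)) (some ((j : Int) + 1))
            = pvWin l k.toNat (j + 1) := by
          rw [show (j : Int) + 1 - k = ((j + 1 - k.toNat : Nat) : Int) by omega,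
            show (j : Int) + 1 = ((j + 1 : Nat) : Int) by push_cast; ring,
            PySem.List.slice_natCast]
          unfold pvWin
          congr 1
          omega
        rw [show pvALoop l k (f + 1) ((j : Int) + 1 - k) (j : Int) count
            = pvALoop l k f ((j : Int) + 1 - k + 1) ((j : Int) + 1)
                (if (((pvWin l k.toNat (j + 1)).toFinset.card : Nat) : Int) = k
                 then count + 1 else count) by
          simp only [pvALoop]
          rw [if_pos (by exact_mod_cast hjn), if_neg (by omega), if_pos (by ring)]
          rw [hsub, pvCounterSize]]
        have h0 : (j : Int) + 1 - k + 1 = max 0 (((j + 1 : Nat) : Int) + 1 - k) := by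
          omega
        have hj1 : (j : Int) + 1 = ((j + 1 : Nat) : Int) := by push_cast; ring
        rw [h0, hj1, ih (j + 1) _ (by omega) (by omega)]
        have hcond : pvCond l k j
            = decide ((((pvWin l k.toNat (j + 1)).toFinset.card : Nat) : Int) = k) := by
          simp only [pvCond, hkj, true_and]
        rw [hcond]
        by_cases hc : (((pvWin l k.toNat (j + 1)).toFinset.card : Nat) : Int) = k
        · simp [hc]; ring
        · simp [hc]
    · have hje : j = l.length := by omega
      have : l.length - j = 0 := by omega
      rw [this]
      show pvALoop l k (f + 1) _ (j : Int) count = _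
      simp only [pvALoop]
      rw [if_neg (by exact_mod_cast Nat.not_lt.mpr (by omega))]
      simp
theorem pvBLoopSpec (l : List Char) (k : Int) (hk : 1 ≤ k) :
    ∀ (rest : List Char) (m : Nat) (freq : PySem.Dict Char Int) (dist cnt : Int),
      m ≤ l.length → rest = l.drop m →
      (∀ c, freq.getD c 0 = ((pvWin l k.toNat m).count c : Int)) →
      dist = ((pvWin l k.toNat m).toFinset.card : Int) →
      ((PySem.List.enumerate rest (m : Int)).foldl (pvBStep l k) (freq, dist, cnt)).2.2
        = cnt + ((List.range' m rest.length).countP (pvCond l k) : Int) := by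
  intro rest
  induction rest with
  | nil => intro m freq dist cnt hm hrest hfreq hdist; simp [PySem.List.enumerate]
  | cons c rest ih =>
    intro m freq dist cnt hm hrest hfreq hdist
    have hmlt : m < l.length := by
      by_contra h
      rw [List.drop_eq_nil_of_le (by omega)] at hrest
      exact List.cons_ne_nil c rest hrest
    have hdrop := List.drop_eq_getElem_cons hmlt
    rw [← hrest] at hdrop
    obtain ⟨hc, hrest'⟩ : l[m] = c ∧ rest = l.drop (m + 1) := by
      injection hdrop with h1 h2
      exact ⟨h1.symm, h2⟩
    have hc! : l[m]! = c := (getElem!_pos l m hmlt).trans hc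
    set kn := k.toNat with hkn
    have hkcast : (kn : Int) = k := by omega
    set w := pvWin l kn m with hw
    -- the state after this iteration
    have henum : PySem.List.enumerate (c :: rest) (m : Int)
        = ((m : Int), c) :: PySem.List.enumerate rest ((m : Int) + 1) := by
      simp [PySem.List.enumerate]
    rw [henum, List.foldl_cons]
    have hm1 : (m : Int) + 1 = ((m + 1 : Nat) : Int) := by push_cast; ring
    have hrlen : (c :: rest).length = rest.length + 1 := rfl
    have hrange : List.range' m (rest.length + 1) = m :: List.range' (m + 1) rest.length := by
      rw [List.range'_succ]
    -- first update: freq1 = counts of w ++ [c]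
    set freq1 := freq.insert c (freq.getD c 0 + 1) with hfreq1def
    have hfreq1 : ∀ c', freq1.getD c' 0 = (((w ++ [c]).count c' : Nat) : Int) := by
      intro c'
      rw [hfreq1def, PySem.Dict.getD_insert, List.count_append]
      by_cases h : c' = c
      · subst h; rw [if_pos rfl, hfreq c']; simp
      · rw [if_neg h, hfreq c', List.count_eq_zero.2 (show c' ∉ [c] by simp [h])]
        simp
    have hdist1 : (if freq1.getD c 0 = 1 then dist + 1 else dist)
        = (((w ++ [c]).toFinset.card : Nat) : Int) := by
      rw [hfreq1 c, pvCardAppend, hdist]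
      by_cases h : c ∈ w
      · rw [if_neg (by simp [List.count_append]; have := List.count_pos_iff.2 h; omega)]
        simp [h]
      · rw [if_pos (by simp [List.count_append, List.count_eq_zero.2 h])]
        simp [h]
    have hcondiff : ∀ B : Int, B = (((pvWin l kn (m + 1)).toFinset.card : Nat) : Int) →
        ((pvCond l k m = true) ↔ (k - 1 ≤ (m : Int) ∧ B = k)) := by
      intro B hB
      simp only [pvCond, decide_eq_true_eq]
      rw [hB, show k.toNat = kn from rfl]
      constructor
      · rintro ⟨h1, h2⟩; exact ⟨by omega, h2⟩
      · rintro ⟨h1, h2⟩; exact ⟨by omega, h2⟩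
    by_cases hbig : kn ≤ m
    · -- sliding phase
      obtain ⟨hwcons, hwnext⟩ := pvWinSlide l kn m c hmlt hc! hbig (by omega)
      have hget : PySem.List.pyGet? l ((m : Int) - k) = some (l[m - kn]!) := by
        rw [show (m : Int) - k = ((m - kn : Nat) : Int) by omega]
        have hlt2 : m - kn < l.length := by omega
        simp [PySem.List.pyGet?, PySem.List.pyIdx?, hlt2]
      set d := l[m - kn]! with hd
      set t := (l.drop (m + 1 - kn)).take (kn - 1) with ht
      -- w ++ [c] = d :: (t ++ [c])
      have hwc : w ++ [c] = d :: (t ++ [c]) := by rw [hw, hwcons]; rfl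
      have hfreq2 : ∀ c', ((freq.insert c (freq.getD c 0 + 1)).insert d
            ((freq.insert c (freq.getD c 0 + 1)).getD d 0 - 1)).getD c' 0
          = (((t ++ [c]).count c' : Nat) : Int) := by
        intro c'
        rw [PySem.Dict.getD_insert]
        by_cases h : c' = d
        · rw [if_pos h, h, hfreq1 d, hwc, List.count_cons]
          simp
        · rw [if_neg h, hfreq1 c', hwc, List.count_cons]
          simp [Ne.symm h]
      have hB2 : (if ((freq.insert c (freq.getD c 0 + 1)).insert d
            ((freq.insert c (freq.getD c 0 + 1)).getD d 0 - 1)).getD d 0 = 0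
          then (((w ++ [c]).toFinset.card : Nat) : Int) - 1
          else (((w ++ [c]).toFinset.card : Nat) : Int))
          = (((t ++ [c]).toFinset.card : Nat) : Int) := by
        rw [hfreq2 d, hwc, pvCardCons]
        by_cases h : d ∈ t ++ [c]
        · rw [if_neg (by have := List.count_pos_iff.2 h; omega)]
          simp [h]
        · rw [if_pos (by rw [List.count_eq_zero.2 h]; simp)]
          simp [h]
      have hstep : pvBStep l k (freq, dist, cnt) ((m : Int), c)
          = (((freq.insert c (freq.getD c 0 + 1)).insert d
                ((freq.insert c (freq.getD c 0 + 1)).getD d 0 - 1)),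
             (if ((freq.insert c (freq.getD c 0 + 1)).insert d
                  ((freq.insert c (freq.getD c 0 + 1)).getD d 0 - 1)).getD d 0 = 0
              then (((w ++ [c]).toFinset.card : Nat) : Int) - 1
              else (((w ++ [c]).toFinset.card : Nat) : Int)),
             if k - 1 ≤ (m : Int) ∧ (if ((freq.insert c (freq.getD c 0 + 1)).insert d
                  ((freq.insert c (freq.getD c 0 + 1)).getD d 0 - 1)).getD d 0 = 0
              then (((w ++ [c]).toFinset.card : Nat) : Int) - 1
              else (((w ++ [c]).toFinset.card : Nat) : Int)) = k
             then cnt + 1 else cnt) := by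
        simp only [pvBStep]
        rw [if_pos (show k ≤ (m : Int) by omega), hget, hdist1]
      rw [hB2] at hstep
      rw [hstep, hm1,
        ih (m + 1) _ _ _ (by omega) hrest'
          (by intro c'; rw [hfreq2 c', hwnext])
          (by rw [hwnext]),
        hrlen, hrange, List.countP_cons]
      have hiff := hcondiff (((t ++ [c]).toFinset.card : Nat) : Int) (by rw [hwnext])
      by_cases hcnd : k - 1 ≤ (m : Int) ∧ (((t ++ [c]).toFinset.card : Nat) : Int) = k
      · rw [if_pos hcnd, if_pos (hiff.2 hcnd)]
        push_cast; ring
      · rw [if_neg hcnd, if_neg (fun hh => hcnd (hiff.1 hh))]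
        push_cast; ring
    · -- growing phase
      have hwnext : pvWin l kn (m + 1) = w ++ [c] := pvWinGrow l kn m c hmlt hc! (by omega)
      have hstep : pvBStep l k (freq, dist, cnt) ((m : Int), c)
          = (freq.insert c (freq.getD c 0 + 1),
             (((w ++ [c]).toFinset.card : Nat) : Int),
             if k - 1 ≤ (m : Int) ∧ (((w ++ [c]).toFinset.card : Nat) : Int) = k
             then cnt + 1 else cnt) := by
        simp only [pvBStep]
        rw [if_neg (show ¬ k ≤ (m : Int) by omega), hdist1]
      rw [hstep, hm1,
        ih (m + 1) _ _ _ (by omega) hrest'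
          (by intro c'; rw [hfreq1 c', hwnext])
          (by rw [hwnext]),
        hrlen, hrange, List.countP_cons]
      have hiff := hcondiff (((w ++ [c]).toFinset.card : Nat) : Int) (by rw [hwnext])
      by_cases hcnd : k - 1 ≤ (m : Int) ∧ (((w ++ [c]).toFinset.card : Nat) : Int) = k
      · rw [if_pos hcnd, if_pos (hiff.2 hcnd)]
        push_cast; ring
      · rw [if_neg hcnd, if_neg (fun hh => hcnd (hiff.1 hh))]
        push_cast; ring

-- ===== VERDICT (by name: the statement is the Claim_ definition above) =====
theorem count_unique_substring_spec : Claim_equal_count_unique_substring := by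
  intro s k _hdom hpre
  unfold Spec_count_unique_substring
  by_cases hk : 1 ≤ k
  · have hA : count_unique_substring s k
        = 0 + ((List.range' 0 (s.toList.length - 0)).countP (pvCond s.toList k) : Int) := by
      have := pvALoopSpec s.toList k hk (s.toList.length + 1) 0 0 (by omega) (by omega)
      rw [show max 0 (((0 : Nat) : Int) + 1 - k) = 0 by omega] at this
      simpa [count_unique_substring] using this
    have hB : count_unique_substring_alt s k
        = 0 + ((List.range' 0 s.toList.length).countP (pvCond s.toList k) : Int) := by
      have := pvBLoopSpec s.toList k hk s.toList 0 PySem.Dict.empty 0 0 (by omega)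
        (by simp)
        (by intro c; simp [pvWin, PySem.Dict.getD_empty])
        (by simp [pvWin])
      simpa [count_unique_substring_alt] using this
    rw [hA, hB]
    simp
  · have hnil : s.toList = [] := hpre.resolve_right hk
    simp [count_unique_substring, count_unique_substring_alt, hnil, pvALoop]
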